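-- pv_equiv track=rewrite | github.com/ishan-parihar/scrapecraft | ai_agent/src/agents/synthesis/quality_assurance_agent.py | _generate_bias_mitigation_suggestions
-- ===== SOURCE A (Python) =====
-- from typing import Dict, Any, List, Optional, Tuple
--
-- def _generate_bias_mitigation_suggestions(biases: List[Dict[str, Any]]) -> List[str]:
--     """Generate suggestions to mitigate detected biases."""
--
--     suggestions = []
--
--     bias_types = [bias["type"] for bias in biases]
--
--     if "selection_bias" in bias_types:
--         suggestions.append("Expand data collection to include underrepresented source types")
--         suggestions.append("Apply statistical weighting to balance source representation")
--
--     if "confirmation_bias" in bias_types: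
--         suggestions.append("Actively seek evidence that challenges initial hypotheses")
--         suggestions.append("Include devil's advocate perspective in analysis")
--
--     if "availability_bias" in bias_types:
--         suggestions.append("Ensure inclusion of historical and less accessible data sources")
--         suggestions.append("Balance recent findings with long-term trend analysis")
--
--     if not suggestions:
--         suggestions.append("Continue monitoring for potential biases in ongoing analysis")
--
--     return suggestions
-- ===== SOURCE B (Python) =====
-- _TABLE = (
--     ("selection_bias", (
--         "Expand data collection to include underrepresented source types",
--         "Apply statistical weighting to balance source representation",
--     )),
--     ("confirmation_bias", (
--         "Actively seek evidence that challenges initial hypotheses",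
--         "Include devil's advocate perspective in analysis",
--     )),
--     ("availability_bias", (
--         "Ensure inclusion of historical and less accessible data sources",
--         "Balance recent findings with long-term trend analysis",
--     )),
-- )
--
--
-- def _generate_bias_mitigation_suggestions(biases):
--     """Generate suggestions to mitigate detected biases."""
--
--     def emit(i):
--         # recursively build the suggestion list from table row i downwards
--         if i == len(_TABLE):
--             return []
--         key, lines = _TABLE[i]
--         rest = emit(i + 1)
--         if any(bias["type"] == key for bias in biases):
--             return list(lines) + rest
--         return rest
--
--     out = emit(0)
--     return out if out else ["Continue monitoring for potential biases in ongoing analysis"]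
-- ===== Notes on version B (the rewrite author's own statement) =====
-- stated objective: alternative
-- what changed: Replaces A's precomputed bias_types list and three unrolled if/append blocks with a recursive descent over an ordered (key, lines) table that builds the output back-to-front, deciding each key by a direct any-scan of biases (no intermediate type list, no accumulator).
import Mathlib
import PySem

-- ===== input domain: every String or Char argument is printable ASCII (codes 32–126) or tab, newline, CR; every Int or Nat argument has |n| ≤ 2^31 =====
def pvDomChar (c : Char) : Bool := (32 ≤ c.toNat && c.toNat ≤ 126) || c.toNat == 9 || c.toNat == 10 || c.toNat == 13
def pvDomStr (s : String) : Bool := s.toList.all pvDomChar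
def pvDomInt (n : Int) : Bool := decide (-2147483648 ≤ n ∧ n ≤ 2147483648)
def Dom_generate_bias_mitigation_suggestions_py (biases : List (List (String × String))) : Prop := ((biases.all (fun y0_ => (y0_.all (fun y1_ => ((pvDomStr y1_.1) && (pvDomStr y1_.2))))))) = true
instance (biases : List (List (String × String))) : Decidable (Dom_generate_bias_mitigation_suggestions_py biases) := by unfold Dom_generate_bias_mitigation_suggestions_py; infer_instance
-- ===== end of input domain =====

-- B replaces A's precomputed bias_types list and three unrolled if/append blocks by a recursive
-- descent over an ordered (key, lines) table, building the output back-to-front and deciding each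
-- key by a direct any-scan of biases; objective: alternative (same cost, different decomposition).

-- ===== PORT A =====
def generate_bias_mitigation_suggestions_py (biases : List (List (String × String))) : List String :=
  -- bias["type"] raises KeyError when the key is missing; Pre_ excludes those inputs, so getD ""
  -- is never the observed value inside Pre_.
  let bias_types := biases.map (fun bias => ((PySem.Dict.mk bias).get? "type").getD "")
  let suggestions : List String := []
  let suggestions := if bias_types.contains "selection_bias" then
      suggestions ++ ["Expand data collection to include underrepresented source types",
                      "Apply statistical weighting to balance source representation"]
    else suggestions
  let suggestions := if bias_types.contains "confirmation_bias" then
      suggestions ++ ["Actively seek evidence that challenges initial hypotheses",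
                      "Include devil's advocate perspective in analysis"]
    else suggestions
  let suggestions := if bias_types.contains "availability_bias" then
      suggestions ++ ["Ensure inclusion of historical and less accessible data sources",
                      "Balance recent findings with long-term trend analysis"]
    else suggestions
  if suggestions = [] then ["Continue monitoring for potential biases in ongoing analysis"]
  else suggestions

-- ===== PORT B =====
def pvTable : List (String × List String) :=
  [("selection_bias",
    ["Expand data collection to include underrepresented source types",
     "Apply statistical weighting to balance source representation"]),
   ("confirmation_bias",
    ["Actively seek evidence that challenges initial hypotheses",
     "Include devil's advocate perspective in analysis"]),
   ("availability_bias",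
    ["Ensure inclusion of historical and less accessible data sources",
     "Balance recent findings with long-term trend analysis"])]

-- emit(i) of Source B: structural recursion on the remaining table rows, back-to-front build.
def pvEmit (biases : List (List (String × String))) : List (String × List String) → List String
  | [] => []
  | (key, lines) :: rest =>
      let r := pvEmit biases rest
      -- bias["type"] == key; KeyError inputs are outside Pre_, so getD "" is never observed there
      if biases.any (fun bias => ((PySem.Dict.mk bias).get? "type").getD "" == key) then
        lines ++ r
      else r

def generate_bias_mitigation_suggestions_py_alt (biases : List (List (String × String))) : List String :=
  let out := pvEmit biases pvTable
  if out = [] then ["Continue monitoring for potential biases in ongoing analysis"] else out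

-- ===== PRECONDITION & SPEC =====
-- Pre_ excludes inputs where some bias dict lacks the key "type": there Python A raises KeyError.
def Pre_generate_bias_mitigation_suggestions_py (biases : List (List (String × String))) : Prop :=
  (biases.all (fun bias => bias.any (fun kv => kv.1 == "type"))) = true
instance (biases : List (List (String × String))) : Decidable (Pre_generate_bias_mitigation_suggestions_py biases) := by unfold Pre_generate_bias_mitigation_suggestions_py; infer_instance
def pvWitness_generate_bias_mitigation_suggestions_py : (List (List (String × String))) :=
  [[("type", "selection_bias")], [("type", "other"), ("note", "x")]]
def Spec_generate_bias_mitigation_suggestions_py (biases : List (List (String × String))) (out : List String) : Prop := out = generate_bias_mitigation_suggestions_py_alt biases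
instance (biases : List (List (String × String))) (out : List String) : Decidable (Spec_generate_bias_mitigation_suggestions_py biases out) := by unfold Spec_generate_bias_mitigation_suggestions_py; infer_instance

-- ===== CLAIM (what is proved, stated in full; the proofs are below) =====
def Claim_equal_generate_bias_mitigation_suggestions_py : Prop := ∀ (biases : List (List (String × String))), Dom_generate_bias_mitigation_suggestions_py biases → Pre_generate_bias_mitigation_suggestions_py biases → Spec_generate_bias_mitigation_suggestions_py biases (generate_bias_mitigation_suggestions_py biases)

-- ===== LEMMAS AND PROOFS =====
-- A's membership test on the precomputed type list equals B's direct any-scan of biases.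
lemma map_contains_eq_any (biases : List (List (String × String))) (k : String) :
    (biases.map (fun bias => ((PySem.Dict.mk bias).get? "type").getD "")).contains k
      = biases.any (fun bias => ((PySem.Dict.mk bias).get? "type").getD "" == k) := by
  induction biases with
  | nil => rfl
  | cons b bs ih => simp only [List.map_cons, List.contains_cons, List.any_cons, ih, BEq.comm]

-- ===== VERDICT (by name: the statement is the Claim_ definition above) =====
theorem generate_bias_mitigation_suggestions_py_spec : Claim_equal_generate_bias_mitigation_suggestions_py := by
  intro biases _ _
  unfold Spec_generate_bias_mitigation_suggestions_py
  unfold generate_bias_mitigation_suggestions_py generate_bias_mitigation_suggestions_py_alt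
  simp only [pvTable, pvEmit, ← map_contains_eq_any]
  generalize (biases.map (fun bias => ((PySem.Dict.mk bias).get? "type").getD "")).contains "selection_bias" = b1
  generalize (biases.map (fun bias => ((PySem.Dict.mk bias).get? "type").getD "")).contains "confirmation_bias" = b2
  generalize (biases.map (fun bias => ((PySem.Dict.mk bias).get? "type").getD "")).contains "availability_bias" = b3
  cases b1 <;> cases b2 <;> cases b3 <;> simp
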